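-- pv_equiv track=rewrite | github.com/peter88213/novelibre | src/nvlib/model/ods/ods_writer.py | _convert_from_novx
-- ===== SOURCE A (Python) =====
-- def _convert_from_novx(text, isLink=False, **kwargs):
--     """Return text, converted from novelibre markup to target format.
--
--     Positional arguments:
--         text -- string to convert.
--
--     Optional arguments:
--         isLink: bool -- if True, avoid double quotes in the returned text.
--
--     Overrides the superclass method.
--     """
--     if not text:
--         return ''
--
--     text = text.rstrip()
--     ODS_REPLACEMENTS = [
--         ('&', '&amp;'),  # must be first!
--         ("'", '&apos;'),
--         ('>', '&gt;'),
--         ('<', '&lt;'),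
--         ('\n', '</text:p>\n<text:p>'),
--     ]
--     if isLink:
--         ODS_REPLACEMENTS.append(('"', '&apos;'))
--     else:
--         ODS_REPLACEMENTS.append(('"', '&quot;'))
--     for nv, ods in ODS_REPLACEMENTS:
--         text = text.replace(nv, ods)
--     return text
-- ===== SOURCE B (Python) =====
-- def _convert_from_novx(text, isLink=False, **kwargs):
--     """Return text converted from novelibre markup to ODS XML, in one
--     pass over the characters using a translation table (instead of six
--     sequential str.replace scans)."""
--     if not text:
--         return ''
--     table = {
--         '&': '&amp;',
--         "'": '&apos;',
--         '>': '&gt;',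
--         '<': '&lt;',
--         '\n': '</text:p>\n<text:p>',
--         '"': '&apos;' if isLink else '&quot;',
--     }
--     chunks = []
--     for c in text.rstrip():
--         chunks.append(table.get(c, c))
--     return ''.join(chunks)
-- ===== Notes on version B (the rewrite author's own statement) =====
-- stated objective: idiomatic
-- what changed: Replaces the six sequential str.replace scans by a single translation table (with the isLink choice folded into the '"' entry) and one pass over the characters that emits each char's escape via table lookup.
import Mathlib
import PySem

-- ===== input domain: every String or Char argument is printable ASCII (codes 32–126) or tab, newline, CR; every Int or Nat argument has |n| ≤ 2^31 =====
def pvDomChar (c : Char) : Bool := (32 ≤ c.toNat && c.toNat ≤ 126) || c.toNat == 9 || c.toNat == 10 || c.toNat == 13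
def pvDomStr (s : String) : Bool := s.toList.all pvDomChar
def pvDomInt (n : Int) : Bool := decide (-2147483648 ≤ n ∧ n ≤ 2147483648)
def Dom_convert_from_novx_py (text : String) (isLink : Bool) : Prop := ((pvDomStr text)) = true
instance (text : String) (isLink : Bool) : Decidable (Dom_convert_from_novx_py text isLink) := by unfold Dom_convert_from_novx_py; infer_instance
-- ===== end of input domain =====

-- B replaces A's six sequential str.replace scans by a single translation table and one pass over the characters (idiomatic; same return value; no claim about speed).


-- ===== PORT A =====
-- literal transliteration of A: early return on falsy text, rstrip, then a fold
-- over the ordered replacement list applying str.replace in sequence.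
def convert_from_novx_py (text : String) (isLink : Bool) : String :=
  if text = "" then ""
  else
    let t := PySem.Str.rstrip text
    let reps : List (String × String) :=
      [("&", "&amp;"), ("'", "&apos;"), (">", "&gt;"), ("<", "&lt;"),
       ("\n", "</text:p>\n<text:p>")] ++
      (if isLink then [("\"", "&apos;")] else [("\"", "&quot;")])
    reps.foldl (fun s p => PySem.Str.replace s p.1 p.2) t

-- ===== PORT B =====
-- B's translation table (a dict: Char → escape string)
def odsTable (isLink : Bool) : PySem.Dict Char String :=
  ⟨[('&', "&amp;"), ('\'', "&apos;"), ('>', "&gt;"), ('<', "&lt;"),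
   ('\n', "</text:p>\n<text:p>"), ('"', if isLink then "&apos;" else "&quot;")]⟩

-- literal transliteration of B: one pass over the rstripped characters,
-- appending table.get(c, c) to the chunk list, then ''.join(chunks).
def convert_from_novx_py_alt (text : String) (isLink : Bool) : String :=
  if text = "" then ""
  else
    let table := odsTable isLink
    let chunks := (PySem.Str.rstrip text).toList.foldl
      (fun acc c => acc ++ [PySem.Dict.getD table c (String.ofList [c])]) []
    PySem.Str.join "" chunks

-- ===== PRECONDITION & SPEC =====
def Spec_convert_from_novx_py (text : String) (isLink : Bool) (out : String) : Prop := out = convert_from_novx_py_alt text isLink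
instance (text : String) (isLink : Bool) (out : String) : Decidable (Spec_convert_from_novx_py text isLink out) := by unfold Spec_convert_from_novx_py; infer_instance

-- ===== CLAIM (what is proved, stated in full; the proofs are below) =====
def Claim_equal_convert_from_novx_py : Prop := ∀ (text : String) (isLink : Bool), Dom_convert_from_novx_py text isLink → Spec_convert_from_novx_py text isLink (convert_from_novx_py text isLink)

-- ===== LEMMAS AND PROOFS =====

-- single-character substitution as a flatMap
def escOf (o : Char) (new : List Char) (c : Char) : List Char :=
  if c = o then new else [c]

theorem go_single (o : Char) (new : List Char) :
    ∀ (fuel : Nat) (l acc : List Char), l.length ≤ fuel →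
      PySem.Chars.replace.go [o] new fuel l acc
        = acc.reverse ++ l.flatMap (escOf o new) := by
  intro fuel
  induction fuel with
  | zero =>
    intro l acc h
    have : l = [] := List.length_eq_zero_iff.mp (Nat.le_zero.mp h)
    subst this; simp [PySem.Chars.replace.go]
  | succ n ih =>
    intro l acc h
    cases l with
    | nil => simp [PySem.Chars.replace.go]
    | cons c t =>
      rw [PySem.Chars.replace.go]
      by_cases hc : c = o
      · subst hc
        simp [List.isPrefixOf, escOf, ih t _ (by simpa using h)]
      · have hp : ¬ ([o].isPrefixOf (c :: t) = true) := by
          simp [List.isPrefixOf]; intro hh; exact hc hh.symm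
        simp only [hp, ih t (c :: acc) (by simpa using h)]
        simp [escOf, hc]

theorem replace_single (l : List Char) (o : Char) (new : List Char) :
    PySem.Chars.replace l [o] new = l.flatMap (escOf o new) := by
  rw [PySem.Chars.replace]
  simp [go_single o new l.length l [] le_rfl]

-- join with empty separator is flatten
theorem join_nil_eq_flatten (parts : List (List Char)) :
    PySem.Chars.join [] parts = parts.flatten := by
  induction parts with
  | nil => simp [PySem.Chars.join_nil]
  | cons a r ih =>
    cases r with
    | nil => simp [PySem.Chars.join_singleton]
    | cons b r' => simp [PySem.Chars.join_cons_cons, ih]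

-- the per-character escape B uses, at the character level
def escTab (isLink : Bool) (c : Char) : List Char :=
  (PySem.Dict.getD (odsTable isLink) c (String.ofList [c])).toList

-- composing A's six single-char substitutions on one character gives B's table entry
theorem comp_escape (isLink : Bool) (c : Char) :
    (((((escOf '&' "&amp;".toList c).flatMap (escOf '\'' "&apos;".toList)).flatMap
        (escOf '>' "&gt;".toList)).flatMap (escOf '<' "&lt;".toList)).flatMap
        (escOf '\n' "</text:p>\n<text:p>".toList)).flatMap
        (escOf '"' (if isLink then "&apos;".toList else "&quot;".toList))
      = escTab isLink c := by
  by_cases h1 : c = '&'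
  · subst h1; cases isLink <;> decide
  by_cases h2 : c = '\''
  · subst h2; cases isLink <;> decide
  by_cases h3 : c = '>'
  · subst h3; cases isLink <;> decide
  by_cases h4 : c = '<'
  · subst h4; cases isLink <;> decide
  by_cases h5 : c = '\n'
  · subst h5; cases isLink <;> decide
  by_cases h6 : c = '"'
  · subst h6; cases isLink <;> decide
  · have e1 : ('&' == c) = false := beq_eq_false_iff_ne.mpr (fun h => h1 h.symm)
    have e2 : ('\'' == c) = false := beq_eq_false_iff_ne.mpr (fun h => h2 h.symm)
    have e3 : ('>' == c) = false := beq_eq_false_iff_ne.mpr (fun h => h3 h.symm)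
    have e4 : ('<' == c) = false := beq_eq_false_iff_ne.mpr (fun h => h4 h.symm)
    have e5 : ('\n' == c) = false := beq_eq_false_iff_ne.mpr (fun h => h5 h.symm)
    have e6 : ('"' == c) = false := beq_eq_false_iff_ne.mpr (fun h => h6 h.symm)
    simp [escOf, h1, h2, h3, h4, h5, h6, escTab, odsTable, PySem.Dict.getD,
      PySem.Dict.get?, e1, e2, e3, e4, e5, e6]

-- literal single-character strings as char lists
theorem tl1 : "&".toList = ['&'] := by decide
theorem tl2 : "'".toList = ['\''] := by decide
theorem tl3 : ">".toList = ['>'] := by decide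
theorem tl4 : "<".toList = ['<'] := by decide
theorem tl5 : "\n".toList = ['\n'] := by decide
theorem tl6 : "\"".toList = ['"'] := by decide
theorem tl0 : "".toList = [] := by decide

-- B's foldl-append accumulates the map
theorem foldl_append_map {α β : Type} (f : α → β) (l : List α) (acc : List β) :
    l.foldl (fun a c => a ++ [f c]) acc = acc ++ l.map f := by
  induction l generalizing acc with
  | nil => simp
  | cons c t ih => simp [ih]

theorem flatten_map_eq_flatMap {α β : Type} (f : α → List β) (l : List α) :
    (l.map f).flatten = l.flatMap f := by
  induction l with
  | nil => simp
  | cons c t ih => simp [ih]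

-- A's whole six-stage pipeline equals one flatMap of the table escape
theorem pipeline (isLink : Bool) (cs : List Char) :
    ((((((cs.flatMap (escOf '&' "&amp;".toList)).flatMap (escOf '\'' "&apos;".toList)).flatMap
        (escOf '>' "&gt;".toList)).flatMap (escOf '<' "&lt;".toList)).flatMap
        (escOf '\n' "</text:p>\n<text:p>".toList)).flatMap
        (escOf '"' (if isLink then "&apos;".toList else "&quot;".toList)))
      = cs.flatMap (escTab isLink) := by
  induction cs with
  | nil => simp
  | cons c t ih =>
    simp only [List.flatMap_cons, List.flatMap_append]
    rw [comp_escape, ih]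

-- ===== VERDICT (by name: the statement is the Claim_ definition above) =====
set_option maxHeartbeats 1000000 in
theorem convert_from_novx_py_spec : Claim_equal_convert_from_novx_py := by
  intro text isLink _
  unfold Spec_convert_from_novx_py convert_from_novx_py convert_from_novx_py_alt
  by_cases he : text = ""
  · simp [he]
  · simp only [he, if_false]
    apply String.toList_inj.mp
    have hpipe := pipeline isLink (PySem.Str.rstrip text).toList
    cases isLink <;>
    · simp only [Bool.false_eq_true, if_false, if_true, List.cons_append, List.nil_append,
        List.foldl_cons, List.foldl_nil] at hpipe ⊢
      simp only [PySem.Str.toList_replace, PySem.Str.toList_join, foldl_append_map,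
        List.nil_append, List.map_map, Function.comp_def]
      simp only [tl0, tl1, tl2, tl3, tl4, tl5, tl6, replace_single,
        join_nil_eq_flatten, flatten_map_eq_flatMap]
      rw [hpipe]
      exact List.flatMap_congr (fun c _ => rfl)
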